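-- pv_equiv track=rewrite | github.com/ratschlab/mGene | release/src/parsegff/GFFParser.py | addCDSphase
-- ===== SOURCE A (Python) =====
-- def addCDSphase(strand, cds):
--     """Add CDS phase to the CDS exons"""
--
--     cds_region, cds_flag = [], 0
--     if strand == '+':
--         for cdspos in cds:
--             if cds_flag == 0:
--                 cdspos = (cdspos[0], cdspos[1], 0)
--                 diff = (cdspos[1]-(cdspos[0]-1))%3
--             else:
--                 xy = 0
--                 if diff == 0:
--                     cdspos = (cdspos[0], cdspos[1], 0)
--                 elif diff == 1:
--                     cdspos = (cdspos[0], cdspos[1], 2)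
--                     xy = 2
--                 elif diff == 2:
--                     cdspos = (cdspos[0], cdspos[1], 1)
--                     xy = 1
--                 diff = ((cdspos[1]-(cdspos[0]-1))-xy)%3
--             cds_region.append(cdspos)
--             cds_flag = 1
--     elif strand == '-':
--         cds.reverse()
--         for cdspos in cds:
--             if cds_flag == 0:
--                 cdspos = (cdspos[0], cdspos[1], 0)
--                 diff = (cdspos[1]-(cdspos[0]-1))%3
--             else:
--                 xy = 0
--                 if diff == 0:
--                     cdspos = (cdspos[0], cdspos[1], 0)
--                 elif diff == 1:
--                     cdspos = (cdspos[0], cdspos[1], 2)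
--                     xy = 2
--                 elif diff == 2:
--                     cdspos = (cdspos[0], cdspos[1], 1)
--                     xy = 1
--                 diff = ((cdspos[1]-(cdspos[0]-1))-xy)%3
--             cds_region.append(cdspos)
--             cds_flag = 1
--         cds_region.reverse()
--     return cds_region
-- ===== SOURCE B (Python) =====
-- def addCDSphase(strand, cds):
--     """Add CDS phase to the CDS exons (prefix-sum formulation)."""
--     if strand == '-':
--         cds.reverse()
--     elif strand != '+':
--         return []
--     # phase of each exon = (3 - (total length of previous exons) % 3) % 3
--     prefix = []
--     total = 0
--     for a, b in cds:
--         prefix.append(total)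
--         total += b - a + 1
--     out = [(a, b, (3 - p % 3) % 3) for (a, b), p in zip(cds, prefix)]
--     if strand == '-':
--         out.reverse()
--     return out
-- ===== Notes on version B (the rewrite author's own statement) =====
-- stated objective: simpler
-- what changed: Replaces the stateful flag/diff case-analysis loop with a two-phase prefix-sum formulation: build the list of cumulative previous-exon lengths, then map each exon to (start, end, (3 - prefix%3)%3); the minus strand reuses the same body on the reversed list.
import Mathlib
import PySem

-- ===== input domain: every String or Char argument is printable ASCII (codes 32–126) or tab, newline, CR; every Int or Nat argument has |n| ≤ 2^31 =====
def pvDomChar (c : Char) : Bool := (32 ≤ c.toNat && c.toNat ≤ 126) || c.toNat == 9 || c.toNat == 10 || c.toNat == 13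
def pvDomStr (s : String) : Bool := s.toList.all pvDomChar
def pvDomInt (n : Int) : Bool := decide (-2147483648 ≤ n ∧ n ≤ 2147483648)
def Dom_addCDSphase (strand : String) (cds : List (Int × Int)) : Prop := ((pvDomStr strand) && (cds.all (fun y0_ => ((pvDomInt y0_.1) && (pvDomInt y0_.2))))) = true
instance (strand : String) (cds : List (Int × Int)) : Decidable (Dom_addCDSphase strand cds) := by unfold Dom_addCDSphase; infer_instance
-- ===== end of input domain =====

-- B replaces A's stateful flag/diff case-analysis loop by a two-phase prefix-sum formulation
-- (objective: simpler). NOTE: on strand '-' the Python A reverses `cds` in place; the Python B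
-- performs the same mutation; the equivalence proved here is about the RETURN value.

-- ===== PORT A =====
-- one iteration of A's loop body; state = (cds_region, cds_flag, diff)
def stepA (st : List (Int × Int × Int) × Int × Int) (cdspos : Int × Int) :
    List (Int × Int × Int) × Int × Int :=
  if st.2.1 = 0 then
    (st.1 ++ [(cdspos.1, cdspos.2, (0 : Int))], 1, PySem.Int.mod (cdspos.2 - (cdspos.1 - 1)) 3)
  else
    -- (new tuple, xy) per branch on diff; the final else is unreachable: diff is a %3 result
    let cxy : (Int × Int × Int) × Int :=
      if st.2.2 = 0 then ((cdspos.1, cdspos.2, 0), 0)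
      else if st.2.2 = 1 then ((cdspos.1, cdspos.2, 2), 2)
      else if st.2.2 = 2 then ((cdspos.1, cdspos.2, 1), 1)
      else ((cdspos.1, cdspos.2, 0), 0)
    (st.1 ++ [cxy.1], 1, PySem.Int.mod ((cdspos.2 - (cdspos.1 - 1)) - cxy.2) 3)

def addCDSphase (strand : String) (cds : List (Int × Int)) : List (Int × Int × Int) :=
  if strand = "+" then
    (cds.foldl stepA ([], 0, 0)).1
  else if strand = "-" then
    ((cds.reverse.foldl stepA ([], 0, 0)).1).reverse
  else []

-- ===== PORT B =====
-- the prefix list: cumulative sum of previous exon lengths, one entry per exon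
def altPrefix (cds : List (Int × Int)) : List Int :=
  (cds.foldl (fun (st : List Int × Int) ab => (st.1 ++ [st.2], st.2 + (ab.2 - ab.1 + 1)))
    ([], 0)).1

-- the common body of B: zip exons with their prefix sums and map to phases
def altBody (cds : List (Int × Int)) : List (Int × Int × Int) :=
  (cds.zip (altPrefix cds)).map
    (fun x => (x.1.1, x.1.2, PySem.Int.mod (3 - PySem.Int.mod x.2 3) 3))

def addCDSphase_alt (strand : String) (cds : List (Int × Int)) : List (Int × Int × Int) :=
  if strand = "-" then (altBody cds.reverse).reverse
  else if strand = "+" then altBody cds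
  else []

-- ===== PRECONDITION & SPEC =====
def Spec_addCDSphase (strand : String) (cds : List (Int × Int)) (out : List (Int × Int × Int)) : Prop := out = addCDSphase_alt strand cds
instance (strand : String) (cds : List (Int × Int)) (out : List (Int × Int × Int)) : Decidable (Spec_addCDSphase strand cds out) := by unfold Spec_addCDSphase; infer_instance

-- ===== CLAIM (what is proved, stated in full; the proofs are below) =====
def Claim_equal_addCDSphase : Prop := ∀ (strand : String) (cds : List (Int × Int)), Dom_addCDSphase strand cds → Spec_addCDSphase strand cds (addCDSphase strand cds)

-- ===== LEMMAS AND PROOFS =====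

-- common specification: phases from a running cumulative length s (Int.emod form)
def phaseSpec : Int → List (Int × Int) → List (Int × Int × Int)
  | _, [] => []
  | s, (a, b) :: t => (a, b, (3 - s % 3) % 3) :: phaseSpec (s + (b - a + 1)) t

theorem pymod3 (x : Int) : PySem.Int.mod x 3 = x % 3 :=
  PySem.Int.mod_eq_emod_of_pos (by norm_num)

theorem foldA_inv (t : List (Int × Int)) (acc : List (Int × Int × Int)) (s : Int) :
    (t.foldl stepA (acc, 1, s % 3)).1 = acc ++ phaseSpec s t := by
  induction t generalizing acc s with
  | nil => simp [phaseSpec]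
  | cons hd tl ih =>
    obtain ⟨a, b⟩ := hd
    have h3 : s % 3 = 0 ∨ s % 3 = 1 ∨ s % 3 = 2 := by omega
    rcases h3 with h | h | h
    · simp only [List.foldl_cons, stepA, h, pymod3]
      norm_num
      rw [show (b - (a - 1)) % 3 = (s + (b - a + 1)) % 3 from by omega, ih]
      simp [phaseSpec, h]
    · simp only [List.foldl_cons, stepA, h, pymod3]
      norm_num
      rw [show (b - (a - 1) - 2) % 3 = (s + (b - a + 1)) % 3 from by omega, ih]
      simp [phaseSpec, h]
    · simp only [List.foldl_cons, stepA, h, pymod3]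
      norm_num
      rw [show (b - (a - 1) - 1) % 3 = (s + (b - a + 1)) % 3 from by omega, ih]
      simp [phaseSpec, h]

theorem foldA_eq (cds : List (Int × Int)) :
    (cds.foldl stepA ([], 0, 0)).1 = phaseSpec 0 cds := by
  cases cds with
  | nil => simp [phaseSpec]
  | cons hd tl =>
    obtain ⟨a, b⟩ := hd
    simp only [List.foldl_cons, stepA, pymod3]
    norm_num
    rw [show (b - (a - 1)) % 3 = (0 + (b - a + 1)) % 3 from by omega,
      foldA_inv tl _ (0 + (b - a + 1))]
    simp [phaseSpec]

def prefList : Int → List (Int × Int) → List Int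
  | _, [] => []
  | s, (a, b) :: t => s :: prefList (s + (b - a + 1)) t

theorem foldP_inv (t : List (Int × Int)) (pre : List Int) (s : Int) :
    (t.foldl (fun (st : List Int × Int) ab => (st.1 ++ [st.2], st.2 + (ab.2 - ab.1 + 1)))
      (pre, s)).1 = pre ++ prefList s t := by
  induction t generalizing pre s with
  | nil => simp [prefList]
  | cons hd tl ih =>
    obtain ⟨a, b⟩ := hd
    simp [prefList, ih]

theorem zip_pref (t : List (Int × Int)) (s : Int) :
    (t.zip (prefList s t)).map
      (fun x => (x.1.1, x.1.2, (3 - x.2 % 3) % 3)) = phaseSpec s t := by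
  induction t generalizing s with
  | nil => simp [prefList, phaseSpec]
  | cons hd tl ih =>
    obtain ⟨a, b⟩ := hd
    simp only [prefList, List.zip_cons_cons, List.map_cons, phaseSpec, ih]

theorem altBody_eq (cds : List (Int × Int)) : altBody cds = phaseSpec 0 cds := by
  unfold altBody altPrefix
  rw [foldP_inv cds [] 0]
  simp only [List.nil_append, pymod3]
  exact zip_pref cds 0

-- ===== VERDICT (by name: the statement is the Claim_ definition above) =====
theorem addCDSphase_spec : Claim_equal_addCDSphase := by
  intro strand cds _
  unfold Spec_addCDSphase addCDSphase addCDSphase_alt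
  by_cases hp : strand = "+"
  · subst hp
    rw [if_pos rfl, if_neg (by decide), if_pos rfl, foldA_eq, altBody_eq]
  · by_cases hm : strand = "-"
    · subst hm
      rw [if_neg (by decide), if_pos rfl, if_pos rfl, foldA_eq, altBody_eq]
    · rw [if_neg hp, if_neg hm, if_neg hm, if_neg hp]
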